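-- pv_equiv track=rewrite | github.com/blamedcloud/DnDStats | fighter_styles.py | get_num_asis
-- ===== SOURCE A (Python) =====
-- def get_num_asis(lvl):
--     asi_lvls = [4,6,8,12,14,16,19]
--     asis = 0
--     for asi_lvl in asi_lvls:
--         if lvl >= asi_lvl:
--             asis += 1
--         else:
--             break
--     return asis
-- ===== SOURCE B (Python) =====
-- def get_num_asis(lvl):
--     # Binary search (bisect_right by hand) over the sorted ASI level list:
--     # the insertion point of lvl is the number of ASI levels reached.
--     asi_lvls = [4, 6, 8, 12, 14, 16, 19]
--     lo, hi = 0, len(asi_lvls)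
--     while lo < hi:
--         mid = (lo + hi) // 2
--         if lvl >= asi_lvls[mid]:
--             lo = mid + 1
--         else:
--             hi = mid
--     return lo
-- ===== Notes on version B (the rewrite author's own statement) =====
-- stated objective: alternative
-- what changed: Replaces the linear scan-with-break by a hand-written bisect_right binary search over the sorted ASI level list, returning the insertion point.
import Mathlib
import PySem

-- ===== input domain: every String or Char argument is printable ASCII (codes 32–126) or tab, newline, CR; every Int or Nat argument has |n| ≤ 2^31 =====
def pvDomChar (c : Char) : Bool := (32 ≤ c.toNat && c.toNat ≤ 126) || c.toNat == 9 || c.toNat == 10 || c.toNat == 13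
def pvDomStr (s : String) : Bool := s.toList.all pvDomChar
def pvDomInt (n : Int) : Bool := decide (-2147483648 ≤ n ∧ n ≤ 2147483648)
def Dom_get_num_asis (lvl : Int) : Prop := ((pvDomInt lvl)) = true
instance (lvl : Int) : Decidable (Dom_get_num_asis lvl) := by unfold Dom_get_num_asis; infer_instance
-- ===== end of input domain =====

-- B replaces A's linear scan-with-break by a hand-written bisect_right binary search
-- over the same sorted ASI level list (objective: alternative algorithm).

-- the asi_lvls literal both Pythons define
def pvAsiLvls : List Int := [4, 6, 8, 12, 14, 16, 19]

-- ===== PORT A =====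
-- for-loop with break over asi_lvls, accumulating asis
def pvALoop (lvl : Int) : List Int → Int → Int
  | [], asis => asis
  | a :: rest, asis => if lvl ≥ a then pvALoop lvl rest (asis + 1) else asis

def get_num_asis (lvl : Int) : Int :=
  pvALoop lvl pvAsiLvls 0

-- ===== PORT B =====
-- while lo < hi: mid = (lo+hi)//2; narrow [lo,hi) — indices as Nat, in-range getD
def pvBisect (xs : List Int) (lvl : Int) (lo hi : Nat) : Nat :=
  if h : lo < hi then
    let mid := (lo + hi) / 2
    if lvl ≥ xs.getD mid 0 then pvBisect xs lvl (mid + 1) hi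
    else pvBisect xs lvl lo mid
  else lo
termination_by hi - lo
decreasing_by all_goals omega

def get_num_asis_alt (lvl : Int) : Int :=
  (pvBisect pvAsiLvls lvl 0 pvAsiLvls.length : Nat)

-- ===== PRECONDITION & SPEC =====
def Spec_get_num_asis (lvl : Int) (out : Int) : Prop := out = get_num_asis_alt lvl
instance (lvl : Int) (out : Int) : Decidable (Spec_get_num_asis lvl out) := by unfold Spec_get_num_asis; infer_instance

-- ===== CLAIM (what is proved, stated in full; the proofs are below) =====
def Claim_equal_get_num_asis : Prop := ∀ (lvl : Int), Dom_get_num_asis lvl → Spec_get_num_asis lvl (get_num_asis lvl)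

-- ===== LEMMAS AND PROOFS =====
-- stepwise evaluation of pvBisect on the concrete (lo, hi) intervals it visits
theorem pvB_leaf (xs : List Int) (lvl : Int) (n : Nat) : pvBisect xs lvl n n = n := by
  rw [pvBisect]; simp

theorem pvB67 (lvl : Int) : pvBisect [4, 6, 8, 12, 14, 16, 19] lvl 6 7 = if 19 ≤ lvl then 7 else 6 := by
  rw [pvBisect]; norm_num [pvB_leaf]

theorem pvB45 (lvl : Int) : pvBisect [4, 6, 8, 12, 14, 16, 19] lvl 4 5 = if 14 ≤ lvl then 5 else 4 := by
  rw [pvBisect]; norm_num [pvB_leaf]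

theorem pvB47 (lvl : Int) :
    pvBisect [4, 6, 8, 12, 14, 16, 19] lvl 4 7 =
      if 16 ≤ lvl then (if 19 ≤ lvl then 7 else 6) else (if 14 ≤ lvl then 5 else 4) := by
  rw [pvBisect]; norm_num [pvB67, pvB45]

theorem pvB23 (lvl : Int) : pvBisect [4, 6, 8, 12, 14, 16, 19] lvl 2 3 = if 8 ≤ lvl then 3 else 2 := by
  rw [pvBisect]; norm_num [pvB_leaf]

theorem pvB01 (lvl : Int) : pvBisect [4, 6, 8, 12, 14, 16, 19] lvl 0 1 = if 4 ≤ lvl then 1 else 0 := by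
  rw [pvBisect]; norm_num [pvB_leaf]

theorem pvB03 (lvl : Int) :
    pvBisect [4, 6, 8, 12, 14, 16, 19] lvl 0 3 =
      if 6 ≤ lvl then (if 8 ≤ lvl then 3 else 2) else (if 4 ≤ lvl then 1 else 0) := by
  rw [pvBisect]; norm_num [pvB23, pvB01]

theorem pvB07 (lvl : Int) :
    pvBisect [4, 6, 8, 12, 14, 16, 19] lvl 0 7 =
      if 12 ≤ lvl then
        (if 16 ≤ lvl then (if 19 ≤ lvl then 7 else 6) else (if 14 ≤ lvl then 5 else 4))
      else (if 6 ≤ lvl then (if 8 ≤ lvl then 3 else 2) else (if 4 ≤ lvl then 1 else 0)) := by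
  rw [pvBisect]; norm_num [pvB47, pvB03]

theorem pv_eq (lvl : Int) : get_num_asis lvl = get_num_asis_alt lvl := by
  simp only [get_num_asis, get_num_asis_alt, pvAsiLvls, pvALoop]
  norm_num [pvB07]
  split_ifs <;> push_cast <;> omega

-- ===== VERDICT (by name: the statement is the Claim_ definition above) =====
theorem get_num_asis_spec : Claim_equal_get_num_asis := by
  intro lvl _
  unfold Spec_get_num_asis
  exact pv_eq lvl
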